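-- pv_equiv track=rewrite | github.com/MakarRybkin/Leetcode | main_algorithms/scanline.py | pointWithMaxCollisions
-- ===== SOURCE A (Python) =====
-- def pointWithMaxCollisions(lr):
--     cur = 0
--     begin_and_end = []
--     for [l, r] in lr:
--         begin_and_end.append((l, -1)) # хотим, чтобы начала находились раньше, чтобы мы их обработали раньше
--         begin_and_end.append((r, +1)) # т.к. считаем что чел на точка находится внутри отрезка даже в конец жизни
--     begin_and_end.sort()
--     cur_open = 0
--     best_point = begin_and_end[0][0]
--     best_open = 0
--     for i in range(len(begin_and_end)):
--         cur_open -= begin_and_end[i][1]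
--         if cur_open > best_open:
--             best_open = cur_open
--             best_point = begin_and_end[i][0]
--     return best_point
-- ===== SOURCE B (Python) =====
-- def pointWithMaxCollisions(lr):
--     # brute force: evaluate coverage directly at each candidate coordinate
--     points = sorted({x for pair in lr for x in pair})
--     best_point = points[0]
--     best = 0
--     for x in points:
--         c = sum(1 for l, r in lr if l <= x) - sum(1 for l, r in lr if r < x)
--         if c > best:
--             best = c
--             best_point = x
--     return best_point
-- ===== Notes on version B (the rewrite author's own statement) =====
-- stated objective: simpler
-- what changed: Replaces A's sorted event-list scanline sweep (paired (coord,type) events with a running open-counter) by direct brute-force evaluation of the coverage count (#starts <= x minus #ends < x) at each distinct sorted coordinate, tracking the first strict maximum.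
import Mathlib
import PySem

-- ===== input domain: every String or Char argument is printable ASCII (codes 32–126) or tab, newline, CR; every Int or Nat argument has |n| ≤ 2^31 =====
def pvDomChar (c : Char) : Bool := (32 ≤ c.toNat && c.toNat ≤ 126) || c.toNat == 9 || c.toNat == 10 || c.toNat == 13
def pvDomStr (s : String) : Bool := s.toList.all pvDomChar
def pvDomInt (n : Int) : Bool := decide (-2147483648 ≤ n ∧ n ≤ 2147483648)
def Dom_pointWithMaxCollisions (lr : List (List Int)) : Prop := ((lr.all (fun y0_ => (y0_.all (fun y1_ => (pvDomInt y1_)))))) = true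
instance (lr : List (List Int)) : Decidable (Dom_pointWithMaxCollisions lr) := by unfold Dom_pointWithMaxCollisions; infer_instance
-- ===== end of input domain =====

-- B replaces A's event-list scanline by direct brute-force coverage evaluation at each
-- distinct sorted coordinate (coverage x = #starts ≤ x − #ends < x); simpler, not faster.


-- ===== PORT A =====
-- A's event list: (l,-1) and (r,1) per row; a row that is not a 2-list raises ValueError
-- in Python (excluded by Pre_), here it is skipped.
def pvEventsA (lr : List (List Int)) : List (Int × Int) :=
  lr.foldl (fun acc p =>
    match p with
    | [l, r] => (acc ++ [(l, -1)]) ++ [(r, 1)]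
    | _ => acc) []

-- A's loop body: state = (cur_open, best_point, best_open)
def pvSweepA (s : Int × Int × Int) (e : Int × Int) : Int × Int × Int :=
  let cur_open := s.1 - e.2
  if s.2.2 < cur_open then (cur_open, e.1, cur_open) else (cur_open, s.2.1, s.2.2)

def pointWithMaxCollisions (lr : List (List Int)) : Int :=
  let begin_and_end := PySem.List.sorted2 (pvEventsA lr) (fun e => e.1) (fun e => e.2)
  -- begin_and_end[0][0] raises IndexError on empty lr (excluded by Pre_)
  (begin_and_end.foldl pvSweepA
      (0, (PySem.List.pyGetD begin_and_end 0 (0, 0)).1, 0)).2.1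

-- ===== PORT B =====
-- sum(1 for l, r in lr if l <= x)
def pvCountLe (lr : List (List Int)) (x : Int) : Int :=
  lr.foldl (fun acc p =>
    match p with
    | [l, _] => if l ≤ x then acc + 1 else acc
    | _ => acc) 0

-- sum(1 for l, r in lr if r < x)
def pvCountLt (lr : List (List Int)) (x : Int) : Int :=
  lr.foldl (fun acc p =>
    match p with
    | [_, r] => if r < x then acc + 1 else acc
    | _ => acc) 0

-- B's loop body: state = (best_point, best)
def pvSweepB (lr : List (List Int)) (s : Int × Int) (x : Int) : Int × Int :=
  let c := pvCountLe lr x - pvCountLt lr x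
  if s.2 < c then (x, c) else s

def pointWithMaxCollisions_alt (lr : List (List Int)) : Int :=
  let points := PySem.List.sorted (PySem.Set.ofList (lr.flatMap (fun pair => pair))) (fun x => x)
  -- points[0] raises IndexError on empty lr (excluded by Pre_)
  (points.foldl (pvSweepB lr) (PySem.List.pyGetD points 0 0, 0)).1

-- ===== PRECONDITION & SPEC =====
-- Pre_ excludes exactly the inputs where Python A raises: the empty list (IndexError) and
-- rows that are not 2-element lists (ValueError on unpacking).
def Pre_pointWithMaxCollisions (lr : List (List Int)) : Prop :=
  lr ≠ [] ∧ ∀ p ∈ lr, p.length = 2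
instance (lr : List (List Int)) : Decidable (Pre_pointWithMaxCollisions lr) := by
  unfold Pre_pointWithMaxCollisions; infer_instance

def pvWitness_pointWithMaxCollisions : List (List Int) := [[0, 2], [1, 3]]

def Spec_pointWithMaxCollisions (lr : List (List Int)) (out : Int) : Prop := out = pointWithMaxCollisions_alt lr
instance (lr : List (List Int)) (out : Int) : Decidable (Spec_pointWithMaxCollisions lr out) := by unfold Spec_pointWithMaxCollisions; infer_instance

-- ===== CLAIM (what is proved, stated in full; the proofs are below) =====
def Claim_equal_pointWithMaxCollisions : Prop := ∀ (lr : List (List Int)), Dom_pointWithMaxCollisions lr → Pre_pointWithMaxCollisions lr → Spec_pointWithMaxCollisions lr (pointWithMaxCollisions lr)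


-- ===== LEMMAS AND PROOFS =====

-- proof-side notions: pvToPairs turns the (all length-2, by Pre_) rows into pairs;
-- pvEvs/pvCoords/pvBlock describe A's event list, B's candidate coordinates and the
-- group of events sharing one coordinate; pvG is B's coverage value; pvStepB is B's
-- loop body expressed over pairs.
def pvToPairs (lr : List (List Int)) : List (Int × Int) :=
  lr.map (fun p => (p.headD 0, p.tail.headD 0))

def pvEvs (ivs : List (Int × Int)) : List (Int × Int) :=
  ivs.flatMap (fun q => [(q.1, -1), (q.2, 1)])

def pvCoords (ivs : List (Int × Int)) : List Int := ivs.flatMap (fun q => [q.1, q.2])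

def pvS (ivs : List (Int × Int)) (x : Int) : Nat := ivs.countP (fun q => decide (q.1 = x))
def pvE (ivs : List (Int × Int)) (x : Int) : Nat := ivs.countP (fun q => decide (q.2 = x))

def pvBlock (ivs : List (Int × Int)) (x : Int) : List (Int × Int) :=
  List.replicate (pvS ivs x) (x, -1) ++ List.replicate (pvE ivs x) (x, 1)

def pvG (ivs : List (Int × Int)) (x : Int) : Int :=
  (ivs.countP (fun q => decide (q.1 ≤ x)) : Int) - (ivs.countP (fun q => decide (q.2 < x)) : Int)

def pvStepB (ivs : List (Int × Int)) (s : Int × Int) (x : Int) : Int × Int :=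
  if s.2 < pvG ivs x then (x, pvG ivs x) else s

def pvLexLe (a b : Int × Int) : Prop := a.1 < b.1 ∨ (a.1 = b.1 ∧ a.2 ≤ b.2)

def pvBefore (a b : Int × Int) : Bool :=
  decide (a.1 < b.1) || (!decide (b.1 < a.1) && decide (a.2 < b.2))

lemma pv_insertBy_pairwise (x : Int × Int) (ys : List (Int × Int))
    (h : ys.Pairwise pvLexLe) : (PySem.List.insertBy pvBefore x ys).Pairwise pvLexLe := by
  induction ys with
  | nil => simp [PySem.List.insertBy, List.pairwise_cons]
  | cons y t ih =>
    rw [show PySem.List.insertBy pvBefore x (y :: t)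
        = if pvBefore x y then x :: y :: t else y :: PySem.List.insertBy pvBefore x t by
      simp [PySem.List.insertBy]]
    rcases List.pairwise_cons.mp h with ⟨hy, ht⟩
    by_cases hb : pvBefore x y
    · simp only [hb]
      refine List.pairwise_cons.mpr ⟨?_, h⟩
      intro z hz
      have hxy : pvLexLe x y := by
        simp [pvBefore, pvLexLe] at hb ⊢; omega
      rcases List.mem_cons.mp hz with rfl | hz
      · exact hxy
      · have := hy z hz
        simp [pvLexLe] at hxy this ⊢; omega
    · simp only [hb]
      rw [if_neg (by simp)]
      refine List.pairwise_cons.mpr ⟨?_, ih ht⟩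
      intro z hz
      rcases (PySem.List.mem_insertBy pvBefore x z t).mp hz with rfl | hz
      · simp [pvBefore, pvLexLe] at hb ⊢; omega
      · exact hy z hz

lemma pv_sorted2_pairwise (xs : List (Int × Int)) :
    (PySem.List.sorted2 xs (fun e => e.1) (fun e => e.2)).Pairwise pvLexLe := by
  show (List.foldl (fun acc x => PySem.List.insertBy _ x acc) [] xs).Pairwise pvLexLe
  have : ∀ (l : List (Int × Int)) (acc : List (Int × Int)), acc.Pairwise pvLexLe →
      (List.foldl (fun acc x => PySem.List.insertBy pvBefore x acc) acc l).Pairwise pvLexLe := by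
    intro l
    induction l with
    | nil => intro acc h; simpa using h
    | cons a t ih => intro acc h; exact ih _ (pv_insertBy_pairwise a acc h)
  exact this xs [] (by simp)

lemma pv_sorted2_eq_of_perm_of_pairwise (xs ys : List (Int × Int))
    (hp : ys.Perm xs) (hs : ys.Pairwise pvLexLe) :
    PySem.List.sorted2 xs (fun e => e.1) (fun e => e.2) = ys := by
  have h1 := pv_sorted2_pairwise xs
  have h2 : (PySem.List.sorted2 xs (fun e => e.1) (fun e => e.2)).Perm ys :=
    (PySem.List.sorted2_perm xs _ _ false).trans hp.symm
  exact h2.eq_of_pairwise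
    (by intro a b _ _ hab hba
        obtain ⟨a1,a2⟩ := a; obtain ⟨b1,b2⟩ := b; simp [pvLexLe] at hab hba ⊢; omega)
    h1 hs

lemma pv_mem_coords (ivs : List (Int × Int)) (x : Int) :
    x ∈ pvCoords ivs ↔ ∃ q ∈ ivs, q.1 = x ∨ q.2 = x := by
  simp [pvCoords, List.mem_flatMap]; constructor
  · rintro ⟨q, hq, h⟩; exact ⟨q, hq, by tauto⟩
  · rintro ⟨q, hq, h⟩; exact ⟨q, hq, by tauto⟩

lemma pv_count_evs (ivs : List (Int × Int)) (z : Int × Int) :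
    (pvEvs ivs).count z
      = (if z.2 = -1 then pvS ivs z.1 else 0) + (if z.2 = 1 then pvE ivs z.1 else 0) := by
  obtain ⟨zx, zt⟩ := z
  induction ivs with
  | nil => simp [pvEvs, pvS, pvE]
  | cons q t ih =>
    simp only [pvEvs, List.flatMap_cons, List.count_append] at *
    rw [ih]
    have hcnt : List.count (zx, zt) [(q.1, -1), (q.2, 1)]
        = (if zt = -1 ∧ q.1 = zx then 1 else 0) + (if zt = 1 ∧ q.2 = zx then 1 else 0) := by
      simp [List.count_cons, Prod.ext_iff]
      split_ifs <;> omega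
    rw [hcnt]
    simp only [pvS, pvE, List.countP_cons]
    by_cases h1 : zt = -1 <;> by_cases h2 : zt = 1 <;> simp [h1, h2] <;>
      by_cases h3 : q.1 = zx <;> by_cases h4 : q.2 = zx <;> simp [h3, h4] <;> omega

lemma pv_count_block (ivs : List (Int × Int)) (y : Int) (z : Int × Int) :
    (pvBlock ivs y).count z
      = if z.1 = y then
          (if z.2 = -1 then pvS ivs y else 0) + (if z.2 = 1 then pvE ivs y else 0)
        else 0 := by
  obtain ⟨zx, zt⟩ := z
  rw [pvBlock, List.count_append, List.count_replicate, List.count_replicate]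
  by_cases hx : zx = y <;> by_cases h1 : zt = -1 <;> by_cases h2 : zt = 1 <;>
    simp [hx, h1, h2, Prod.ext_iff] <;> omega

lemma pv_count_blocks (ivs : List (Int × Int)) (P : List Int) (hnd : P.Nodup) (z : Int × Int) :
    (P.flatMap (pvBlock ivs)).count z
      = if z.1 ∈ P then
          (if z.2 = -1 then pvS ivs z.1 else 0) + (if z.2 = 1 then pvE ivs z.1 else 0)
        else 0 := by
  induction P with
  | nil => simp
  | cons y t ih =>
    rcases List.nodup_cons.mp hnd with ⟨hy, hnd'⟩
    simp only [List.flatMap_cons, List.count_append, ih hnd', pv_count_block]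
    by_cases hzy : z.1 = y
    · subst hzy
      simp [hy]
    · simp [hzy, List.mem_cons]

lemma pv_perm_blocks (ivs : List (Int × Int)) (P : List Int) (hnd : P.Nodup)
    (hmem : ∀ x, x ∈ P ↔ x ∈ pvCoords ivs) :
    (P.flatMap (pvBlock ivs)).Perm (pvEvs ivs) := by
  rw [List.perm_iff_count]
  intro z
  rw [pv_count_evs, pv_count_blocks ivs P hnd]
  by_cases h : z.1 ∈ P
  · simp [h]
  · rw [hmem] at h
    have h1 : pvS ivs z.1 = 0 := by
      rw [pvS, List.countP_eq_zero]
      intro q hq hq1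
      exact h ((pv_mem_coords ivs z.1).mpr ⟨q, hq, Or.inl (by simpa using hq1)⟩)
    have h2 : pvE ivs z.1 = 0 := by
      rw [pvE, List.countP_eq_zero]
      intro q hq hq1
      exact h ((pv_mem_coords ivs z.1).mpr ⟨q, hq, Or.inr (by simpa using hq1)⟩)
    simp [h1, h2]

lemma pv_mem_block_fst (ivs : List (Int × Int)) (y : Int) (z : Int × Int)
    (h : z ∈ pvBlock ivs y) : z.1 = y := by
  simp [pvBlock] at h
  rcases h with h | h <;> rcases h with ⟨-, rfl⟩ <;> rfl

lemma pv_pairwise_blocks (ivs : List (Int × Int)) (P : List Int)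
    (hs : P.Pairwise (· < ·)) :
    (P.flatMap (pvBlock ivs)).Pairwise pvLexLe := by
  induction P with
  | nil => simp
  | cons y t ih =>
    rcases List.pairwise_cons.mp hs with ⟨hy, hs'⟩
    simp only [List.flatMap_cons]
    rw [List.pairwise_append]
    refine ⟨?_, ih hs', ?_⟩
    · -- block itself
      rw [pvBlock, List.pairwise_append]
      refine ⟨List.pairwise_replicate.mpr (Or.inr (Or.inr ⟨rfl, le_refl _⟩)),
        List.pairwise_replicate.mpr (Or.inr (Or.inr ⟨rfl, le_refl _⟩)), ?_⟩
      · intro a ha b hb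
        rcases List.eq_of_mem_replicate ha with rfl
        rcases List.eq_of_mem_replicate hb with rfl
        right; exact ⟨rfl, by norm_num⟩
    · intro a ha b hb
      rcases List.mem_flatMap.mp hb with ⟨x, hx, hbx⟩
      have h1 := pv_mem_block_fst ivs y a ha
      have h2 := pv_mem_block_fst ivs x b hbx
      left; rw [h1, h2]; exact hy x hx

lemma pv_countP_split {α : Type} (l : List α) (p q r : α → Bool)
    (h : ∀ a ∈ l, (p a = true ↔ q a = true ∨ r a = true))
    (hd : ∀ a ∈ l, ¬(q a = true ∧ r a = true)) :
    l.countP p = l.countP q + l.countP r := by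
  induction l with
  | nil => simp
  | cons a t ih =>
    simp only [List.countP_cons]
    rw [ih (fun a ha => h a (List.mem_cons_of_mem _ ha)) (fun a ha => hd a (List.mem_cons_of_mem _ ha))]
    have h1 := h a (List.mem_cons_self)
    have h2 := hd a (List.mem_cons_self)
    by_cases hq : q a = true <;> by_cases hr : r a = true <;> simp_all <;> omega

lemma pv_foldl_starts (x bp bo c : Int) (m : Nat) (h : c ≤ bo) :
    (List.replicate m ((x, -1) : Int × Int)).foldl pvSweepA (c, bp, bo)
      = (c + m, if bo < c + m then x else bp, max bo (c + m)) := by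
  induction m generalizing c bp bo with
  | zero =>
    refine Prod.ext ?_ (Prod.ext ?_ ?_) <;> simp <;> omega
  | succ k ih =>
    rw [List.replicate_succ, List.foldl_cons]
    have hstep : pvSweepA (c, bp, bo) (x, -1)
        = (c + 1, if bo < c + 1 then x else bp, max bo (c + 1)) := by
      simp [pvSweepA]; split_ifs <;> simp <;> omega
    rw [hstep, ih (if bo < c + 1 then x else bp) (max bo (c + 1)) (c + 1) (le_max_right _ _)]
    refine Prod.ext ?_ (Prod.ext ?_ ?_) <;> simp <;> (try split_ifs) <;> omega

lemma pv_foldl_ends (x bp bo c : Int) (n : Nat) (h : c ≤ bo) :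
    (List.replicate n ((x, 1) : Int × Int)).foldl pvSweepA (c, bp, bo) = (c - n, bp, bo) := by
  induction n generalizing c with
  | zero => simp
  | succ k ih =>
    rw [List.replicate_succ, List.foldl_cons]
    have hstep : pvSweepA (c, bp, bo) (x, 1) = (c - 1, bp, bo) := by
      simp [pvSweepA]; omega
    rw [hstep, ih (c - 1) (by omega)]
    refine Prod.ext ?_ rfl
    simp; omega

lemma pv_foldl_block (ivs : List (Int × Int)) (x bp bo c : Int) (h : c ≤ bo) :
    (pvBlock ivs x).foldl pvSweepA (c, bp, bo)
      = (c + pvS ivs x - pvE ivs x,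
         if bo < c + pvS ivs x then x else bp,
         max bo (c + pvS ivs x)) := by
  rw [pvBlock, List.foldl_append, pv_foldl_starts x bp bo c _ h,
      pv_foldl_ends x _ _ _ _ (le_max_right _ _)]

lemma pv_sweep_eq (ivs : List (Int × Int)) :
    ∀ (P : List Int) (bp bo c : Int),
      P.Pairwise (· < ·) →
      (∀ q ∈ ivs, q.1 ∈ P ∨ ∀ x ∈ P, q.1 < x) →
      (∀ q ∈ ivs, q.2 ∈ P ∨ ∀ x ∈ P, q.2 < x) →
      c = (ivs.countP (fun q => P.all (fun x => decide (q.1 < x))) : Int)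
          - (ivs.countP (fun q => P.all (fun x => decide (q.2 < x))) : Int) →
      c ≤ bo →
      ((P.flatMap (pvBlock ivs)).foldl pvSweepA (c, bp, bo)).2
        = P.foldl (pvStepB ivs) (bp, bo) := by
  intro P
  induction P with
  | nil => intro bp bo c _ _ _ _ _; simp
  | cons x t ih =>
    intro bp bo c hpw hin1 hin2 hc hcb
    rcases List.pairwise_cons.mp hpw with ⟨hx, hpw'⟩
    -- count identities
    have key1 : ivs.countP (fun q => t.all (fun y => decide (q.1 < y)))
        = ivs.countP (fun q => decide (q.1 ≤ x)) := by
      apply List.countP_congr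
      intro q hq
      simp only [List.all_eq_true, decide_eq_true_eq]
      constructor
      · intro hall
        rcases hin1 q hq with hmem | hlt
        · rcases List.mem_cons.mp hmem with h | h
          · omega
          · exact absurd (hall q.1 h) (by omega)
        · exact le_of_lt (hlt x List.mem_cons_self)
      · intro hle y hy
        exact lt_of_le_of_lt hle (hx y hy)
    have key2 : ivs.countP (fun q => t.all (fun y => decide (q.2 < y)))
        = ivs.countP (fun q => decide (q.2 ≤ x)) := by
      apply List.countP_congr
      intro q hq
      simp only [List.all_eq_true, decide_eq_true_eq]
      constructor
      · intro hall
        rcases hin2 q hq with hmem | hlt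
        · rcases List.mem_cons.mp hmem with h | h
          · omega
          · exact absurd (hall q.2 h) (by omega)
        · exact le_of_lt (hlt x List.mem_cons_self)
      · intro hle y hy
        exact lt_of_le_of_lt hle (hx y hy)
    have split1 : ivs.countP (fun q => decide (q.1 ≤ x))
        = ivs.countP (fun q => (x :: t).all (fun y => decide (q.1 < y))) + pvS ivs x := by
      rw [pvS]
      apply pv_countP_split
      · intro q hq
        simp only [List.all_eq_true, decide_eq_true_eq, List.mem_cons]
        constructor
        · intro hle
          by_cases hqx : q.1 = x
          · right; exact hqx
          · left; intro y hy
            rcases hy with rfl | hy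
            · omega
            · exact lt_of_le_of_lt hle (hx y hy)
        · rintro (hall | rfl)
          · exact le_of_lt (hall x (Or.inl rfl))
          · exact le_refl _
      · intro q hq
        simp only [List.all_eq_true, decide_eq_true_eq, List.mem_cons]
        rintro ⟨hall, rfl⟩
        exact absurd (hall q.1 (Or.inl rfl)) (by omega)
    have split2 : ivs.countP (fun q => decide (q.2 ≤ x))
        = ivs.countP (fun q => (x :: t).all (fun y => decide (q.2 < y))) + pvE ivs x := by
      rw [pvE]
      apply pv_countP_split
      · intro q hq
        simp only [List.all_eq_true, decide_eq_true_eq, List.mem_cons]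
        constructor
        · intro hle
          by_cases hqx : q.2 = x
          · right; exact hqx
          · left; intro y hy
            rcases hy with rfl | hy
            · omega
            · exact lt_of_le_of_lt hle (hx y hy)
        · rintro (hall | rfl)
          · exact le_of_lt (hall x (Or.inl rfl))
          · exact le_refl _
      · intro q hq
        simp only [List.all_eq_true, decide_eq_true_eq, List.mem_cons]
        rintro ⟨hall, rfl⟩
        exact absurd (hall q.2 (Or.inl rfl)) (by omega)
    have keyG : ivs.countP (fun q => decide (q.2 < x))
        = ivs.countP (fun q => (x :: t).all (fun y => decide (q.2 < y))) := by
      apply List.countP_congr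
      intro q hq
      simp only [List.all_eq_true, decide_eq_true_eq, List.mem_cons]
      constructor
      · intro hlt y hy
        rcases hy with rfl | hy
        · exact hlt
        · exact lt_trans hlt (hx y hy)
      · intro hall
        exact hall x (Or.inl rfl)
    -- the value c + S x is exactly pvG ivs x
    have hgx : c + (pvS ivs x : Int) = pvG ivs x := by
      rw [pvG, hc]
      rw [show (ivs.countP (fun q => decide (q.1 ≤ x)) : Int)
            = (ivs.countP (fun q => (x :: t).all (fun y => decide (q.1 < y))) : Int) + (pvS ivs x : Int) by
          exact_mod_cast split1]
      rw [show (ivs.countP (fun q => decide (q.2 < x)) : Int)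
            = (ivs.countP (fun q => (x :: t).all (fun y => decide (q.2 < y))) : Int) by
          exact_mod_cast keyG]
      ring
    have hc' : c + (pvS ivs x : Int) - (pvE ivs x : Int)
        = (ivs.countP (fun q => t.all (fun y => decide (q.1 < y))) : Int)
          - (ivs.countP (fun q => t.all (fun y => decide (q.2 < y))) : Int) := by
      rw [key1, key2, hc]
      have e1 : (ivs.countP (fun q => decide (q.1 ≤ x)) : Int)
          = (ivs.countP (fun q => (x :: t).all (fun y => decide (q.1 < y))) : Int) + (pvS ivs x : Int) := by
        exact_mod_cast split1
      have e2 : (ivs.countP (fun q => decide (q.2 ≤ x)) : Int)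
          = (ivs.countP (fun q => (x :: t).all (fun y => decide (q.2 < y))) : Int) + (pvE ivs x : Int) := by
        exact_mod_cast split2
      omega
    -- unfold one block
    rw [List.flatMap_cons, List.foldl_append, pv_foldl_block ivs x bp bo c hcb,
        List.foldl_cons]
    have hstepB : pvStepB ivs (bp, bo) x
        = (if bo < c + (pvS ivs x : Int) then x else bp, max bo (c + (pvS ivs x : Int))) := by
      rw [pvStepB, ← hgx]
      split_ifs <;> simp <;> omega
    rw [hstepB]
    -- re-establish the invariants and apply ih
    apply ih
    · exact hpw'
    · intro q hq
      rcases hin1 q hq with hmem | hlt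
      · rcases List.mem_cons.mp hmem with h | h
        · right; intro y hy; rw [h]; exact hx y hy
        · left; exact h
      · right; intro y hy; exact hlt y (List.mem_cons_of_mem _ hy)
    · intro q hq
      rcases hin2 q hq with hmem | hlt
      · rcases List.mem_cons.mp hmem with h | h
        · right; intro y hy; rw [h]; exact hx y hy
        · left; exact h
      · right; intro y hy; exact hlt y (List.mem_cons_of_mem _ hy)
    · exact hc'
    · rw [hc']
      rw [key1, key2]
      have e2 : (ivs.countP (fun q => decide (q.2 ≤ x)) : Int)
          = (ivs.countP (fun q => (x :: t).all (fun y => decide (q.2 < y))) : Int) + (pvE ivs x : Int) := by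
        exact_mod_cast split2
      have e3 : (ivs.countP (fun q => decide (q.2 < x)) : Int)
          = (ivs.countP (fun q => (x :: t).all (fun y => decide (q.2 < y))) : Int) := by
        exact_mod_cast keyG
      have := hgx
      rw [pvG] at this
      omega

lemma pv_len2 (p : List Int) (h : p.length = 2) : ∃ a b : Int, p = [a, b] := by
  match p, h with
  | [a, b], _ => exact ⟨a, b, rfl⟩

lemma pv_eventsA_eq (lr : List (List Int)) (hlen : ∀ p ∈ lr, p.length = 2) :
    pvEventsA lr = pvEvs (pvToPairs lr) := by
  rw [pvEventsA]
  suffices h : ∀ acc, lr.foldl (fun acc p =>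
      match p with
      | [l, r] => (acc ++ [(l, -1)]) ++ [(r, 1)]
      | _ => acc) acc = acc ++ pvEvs (pvToPairs lr) by
    simpa using h []
  induction lr with
  | nil => intro acc; simp [pvEvs, pvToPairs]
  | cons p t ih =>
    intro acc
    obtain ⟨a, b, rfl⟩ := pv_len2 p (hlen p List.mem_cons_self)
    rw [List.foldl_cons, ih (fun q hq => hlen q (List.mem_cons_of_mem _ hq))]
    simp [pvEvs, pvToPairs]

lemma pv_coords_eq (lr : List (List Int)) (hlen : ∀ p ∈ lr, p.length = 2) :
    lr.flatMap (fun pair => pair) = pvCoords (pvToPairs lr) := by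
  induction lr with
  | nil => simp [pvCoords, pvToPairs]
  | cons p t ih =>
    obtain ⟨a, b, rfl⟩ := pv_len2 p (hlen p List.mem_cons_self)
    simp only [List.flatMap_cons, pvCoords, pvToPairs, List.map_cons] at *
    rw [ih (fun q hq => hlen q (List.mem_cons_of_mem _ hq))]
    simp

lemma pv_countLe_eq (lr : List (List Int)) (x : Int) (hlen : ∀ p ∈ lr, p.length = 2) :
    pvCountLe lr x = ((pvToPairs lr).countP (fun q => decide (q.1 ≤ x)) : Int) := by
  rw [pvCountLe]
  suffices h : ∀ (a : Int), lr.foldl (fun acc p =>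
      match p with
      | [l, _] => if l ≤ x then acc + 1 else acc
      | _ => acc) a = a + ((pvToPairs lr).countP (fun q => decide (q.1 ≤ x)) : Int) by
    simpa using h 0
  induction lr with
  | nil => intro a; simp [pvToPairs]
  | cons p t ih =>
    intro a
    obtain ⟨l0, r0, rfl⟩ := pv_len2 p (hlen p List.mem_cons_self)
    rw [List.foldl_cons]
    show (t.foldl _ (if l0 ≤ x then a + 1 else a)) = _
    rw [ih (fun q hq => hlen q (List.mem_cons_of_mem _ hq))]
    simp only [pvToPairs, List.map_cons, List.countP_cons, List.headD_cons, List.tail_cons, decide_eq_true_eq]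
    split_ifs <;> omega

lemma pv_countLt_eq (lr : List (List Int)) (x : Int) (hlen : ∀ p ∈ lr, p.length = 2) :
    pvCountLt lr x = ((pvToPairs lr).countP (fun q => decide (q.2 < x)) : Int) := by
  rw [pvCountLt]
  suffices h : ∀ (a : Int), lr.foldl (fun acc p =>
      match p with
      | [_, r] => if r < x then acc + 1 else acc
      | _ => acc) a = a + ((pvToPairs lr).countP (fun q => decide (q.2 < x)) : Int) by
    simpa using h 0
  induction lr with
  | nil => intro a; simp [pvToPairs]
  | cons p t ih =>
    intro a
    obtain ⟨l0, r0, rfl⟩ := pv_len2 p (hlen p List.mem_cons_self)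
    rw [List.foldl_cons]
    show (t.foldl _ (if r0 < x then a + 1 else a)) = _
    rw [ih (fun q hq => hlen q (List.mem_cons_of_mem _ hq))]
    simp only [pvToPairs, List.map_cons, List.countP_cons, List.headD_cons, List.tail_cons, decide_eq_true_eq]
    split_ifs <;> omega

lemma pv_block_ne_nil (ivs : List (Int × Int)) (y : Int) (hy : y ∈ pvCoords ivs) :
    pvBlock ivs y ≠ [] := by
  rcases (pv_mem_coords ivs y).mp hy with ⟨q, hq, h⟩
  rw [pvBlock]
  intro hnil
  rcases List.append_eq_nil_iff.mp hnil with ⟨h1, h2⟩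
  have hS : pvS ivs y = 0 := by simpa using congrArg List.length h1
  have hE : pvE ivs y = 0 := by simpa using congrArg List.length h2
  rcases h with h | h
  · rw [pvS, List.countP_eq_zero] at hS
    exact absurd (by simpa using h) (by simpa using hS q hq)
  · rw [pvE, List.countP_eq_zero] at hE
    exact absurd (by simpa using h) (by simpa using hE q hq)

theorem pv_main (lr : List (List Int)) (hne : lr ≠ []) (hlen : ∀ p ∈ lr, p.length = 2) :
    pointWithMaxCollisions lr = pointWithMaxCollisions_alt lr := by
  have hA : pvEventsA lr = pvEvs (pvToPairs lr) := pv_eventsA_eq lr hlen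
  have hC : lr.flatMap (fun pair => pair) = pvCoords (pvToPairs lr) := pv_coords_eq lr hlen
  simp only [pointWithMaxCollisions, pointWithMaxCollisions_alt, hA, hC]
  have hmemP : ∀ y, y ∈ PySem.List.sorted (PySem.Set.ofList (pvCoords (pvToPairs lr))) (fun x => x)
      ↔ y ∈ pvCoords (pvToPairs lr) := by
    intro y
    rw [PySem.List.mem_sorted, PySem.Set.mem_ofList]
  have hpw : (PySem.List.sorted (PySem.Set.ofList (pvCoords (pvToPairs lr))) (fun x => x)).Pairwise (· < ·) :=
    PySem.List.sorted_ofList_pairwise_lt _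
  set ivs := pvToPairs lr with hivs
  set P := PySem.List.sorted (PySem.Set.ofList (pvCoords ivs)) (fun x => x) with hPdef
  have hnodup : P.Nodup := hpw.imp (fun h => ne_of_lt h)
  have hsorted2 : PySem.List.sorted2 (pvEvs ivs) (fun e => e.1) (fun e => e.2)
      = P.flatMap (pvBlock ivs) :=
    pv_sorted2_eq_of_perm_of_pairwise _ _ (pv_perm_blocks ivs P hnodup hmemP)
      (pv_pairwise_blocks ivs P hpw)
  -- P is nonempty
  obtain ⟨p0, t0, rfl⟩ := List.exists_cons_of_ne_nil hne
  obtain ⟨a0, b0, hp0⟩ := pv_len2 p0 (hlen p0 List.mem_cons_self)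
  have ha0 : a0 ∈ pvCoords ivs := by
    rw [hivs, pvToPairs, pvCoords]
    subst hp0
    simp
  have hPne : P ≠ [] := List.ne_nil_of_mem ((hmemP a0).mpr ha0)
  obtain ⟨y, t', hP⟩ := List.exists_cons_of_ne_nil hPne
  -- head of the sorted event list is (y, _)
  have hyc : y ∈ pvCoords ivs := (hmemP y).mp (by rw [hP]; exact List.mem_cons_self)
  obtain ⟨e0, et, hblk⟩ := List.exists_cons_of_ne_nil (pv_block_ne_nil ivs y hyc)
  have he0 : e0.1 = y := pv_mem_block_fst ivs y e0 (by rw [hblk]; exact List.mem_cons_self)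
  have hheadA : (PySem.List.pyGetD (P.flatMap (pvBlock ivs)) 0 ((0 : Int), (0 : Int))).1 = y := by
    rw [hP, List.flatMap_cons, hblk]
    rw [show (e0 :: et) ++ (t'.flatMap (pvBlock ivs)) = e0 :: (et ++ t'.flatMap (pvBlock ivs)) by simp]
    rw [PySem.List.pyGetD_zero_cons]
    exact he0
  have hheadB : PySem.List.pyGetD P 0 (0 : Int) = y := by
    rw [hP, PySem.List.pyGetD_zero_cons]
  -- B's loop body over rows equals pvStepB over pairs
  have hB : pvSweepB (p0 :: t0) = pvStepB ivs := by
    funext s x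
    rw [pvSweepB, pvStepB, pvG, pv_countLe_eq _ x hlen, pv_countLt_eq _ x hlen]
  -- initial prefix counts are zero
  have cz1 : ivs.countP (fun q => P.all (fun x => decide (q.1 < x))) = 0 := by
    rw [List.countP_eq_zero]
    intro q hq
    simp only [List.all_eq_true, decide_eq_true_eq, not_forall]
    refine ⟨q.1, ?_⟩
    have : q.1 ∈ P := (hmemP q.1).mpr ((pv_mem_coords ivs q.1).mpr ⟨q, hq, Or.inl rfl⟩)
    simp [this]
  have cz2 : ivs.countP (fun q => P.all (fun x => decide (q.2 < x))) = 0 := by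
    rw [List.countP_eq_zero]
    intro q hq
    simp only [List.all_eq_true, decide_eq_true_eq, not_forall]
    refine ⟨q.2, ?_⟩
    have : q.2 ∈ P := (hmemP q.2).mpr ((pv_mem_coords ivs q.2).mpr ⟨q, hq, Or.inr rfl⟩)
    simp [this]
  have hmain := pv_sweep_eq ivs P
    (PySem.List.pyGetD (P.flatMap (pvBlock ivs)) 0 ((0 : Int), (0 : Int))).1 0 0
    hpw
    (fun q hq => Or.inl ((hmemP q.1).mpr ((pv_mem_coords ivs q.1).mpr ⟨q, hq, Or.inl rfl⟩)))
    (fun q hq => Or.inl ((hmemP q.2).mpr ((pv_mem_coords ivs q.2).mpr ⟨q, hq, Or.inr rfl⟩)))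
    (by rw [cz1, cz2]; simp)
    (le_refl 0)
  rw [hsorted2, hB, hmain, hheadA, hheadB]

-- ===== VERDICT (by name: the statement is the Claim_ definition above) =====
theorem pointWithMaxCollisions_spec : Claim_equal_pointWithMaxCollisions := by
  intro lr _ hpre
  unfold Spec_pointWithMaxCollisions
  exact pv_main lr hpre.1 hpre.2
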